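-- pv_equiv track=rewrite | github.com/happyyeon/my_algorithm | 프로그래머스/unrated/135808. 과일 장수/과일 장수.py | solution
-- ===== SOURCE A (Python) =====
-- def calc(start,m,score):
--     return min(score[start:start+m])*m
--
-- def solution(k, m, score):
--     answer = 0
--     score.sort(reverse=True)
--     start = 0
--     while start+m <= len(score):
--         answer += calc(start,m,score)
--         start += m
--     return answer
-- ===== SOURCE B (Python) =====
-- def solution(k, m, score):
--     counts = {}
--     for v in score:
--         counts[v] = counts.get(v, 0) + 1
--     total = 0
--     pos = 0
--     for v in sorted(counts, reverse=True):
--         c = counts[v]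
--         total += v * ((pos + c) // m - pos // m)
--         pos += c
--     return total * m
-- ===== Notes on version B (the rewrite author's own statement) =====
-- stated objective: alternative
-- what changed: B replaces A's sort of the whole list plus per-block min() scans by a value-frequency dict: it counts occurrences, iterates only the distinct values in descending order, and for each value adds value * (number of block-boundaries falling inside that value's index range), computed with two floor divisions instead of any block scan.
import Mathlib
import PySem

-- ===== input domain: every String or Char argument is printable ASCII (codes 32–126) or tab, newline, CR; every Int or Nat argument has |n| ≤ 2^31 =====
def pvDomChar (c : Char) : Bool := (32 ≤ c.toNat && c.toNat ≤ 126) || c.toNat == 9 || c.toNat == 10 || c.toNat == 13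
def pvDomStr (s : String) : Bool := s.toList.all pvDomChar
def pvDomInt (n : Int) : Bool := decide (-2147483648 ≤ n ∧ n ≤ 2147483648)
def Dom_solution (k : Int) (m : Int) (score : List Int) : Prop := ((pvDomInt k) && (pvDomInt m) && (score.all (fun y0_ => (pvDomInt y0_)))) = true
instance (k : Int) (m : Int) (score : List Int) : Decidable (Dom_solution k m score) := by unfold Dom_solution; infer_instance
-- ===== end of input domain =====

-- B counts occurrences in a dict and walks the distinct values in descending order,
-- turning each value's index range into a block-boundary count via two floor divisions —
-- no sort of the full list, no per-block min scan (objective: alternative).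
-- A sorts 'score' in place; B does not mutate it: the equivalence proved here is about the return value only.

-- ===== PORT A =====
-- calc(start, m, score) = min(score[start:start+m]) * m ; min([]) raises ValueError,
-- which Pre_ excludes (it is reached exactly when m ≤ 0), so .getD 0 is never the value used.
def pyCalc (start : Int) (m : Int) (score : List Int) : Int :=
  (PySem.List.min? (PySem.List.slice score (some start) (some (start + m))) (fun x => x)).getD 0 * m

-- the while loop: 'while start+m <= len(score): answer += calc(...); start += m'.
-- fuel s.length+1 bounds the iteration count (each step consumes m ≥ 1 elements under Pre_).
def solLoop (m : Int) (s : List Int) : Nat → Int → Int → Int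
  | 0, _, acc => acc
  | fuel + 1, start, acc =>
    if start + m ≤ PySem.List.len s then
      solLoop m s fuel (start + m) (acc + pyCalc start m s)
    else acc

def solution (k : Int) (m : Int) (score : List Int) : Int :=
  let s := PySem.List.sorted score (fun x => x) true
  solLoop m s (s.length + 1) 0 0

-- ===== PORT B =====
-- counts = {}; for v in score: counts[v] = counts.get(v, 0) + 1
-- then for v in sorted(counts, reverse=True): total += v * ((pos+c)//m - pos//m); pos += c
def solution_alt (k : Int) (m : Int) (score : List Int) : Int :=
  let counts := score.foldl (fun d v => d.insert v (d.getD v 0 + 1)) (PySem.Dict.empty : PySem.Dict Int Int)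
  let res := (PySem.List.sorted counts.keys (fun x => x) true).foldl
      (fun (st : Int × Int) v =>
        (st.1 + v * (PySem.Int.floordiv (st.2 + counts.getD v 0) m - PySem.Int.floordiv st.2 m),
         st.2 + counts.getD v 0))
      ((0 : Int), (0 : Int))
  res.1 * m

-- ===== PRECONDITION & SPEC =====
-- Pre_ excludes exactly m ≤ 0: there Python A always raises ValueError (m = 0 calls min([])
-- immediately; m < 0 reaches an empty slice after at most len(score) iterations).
def Pre_solution (k : Int) (m : Int) (score : List Int) : Prop := 1 ≤ m
instance (k : Int) (m : Int) (score : List Int) : Decidable (Pre_solution k m score) := by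
  unfold Pre_solution; infer_instance

def pvWitness_solution : Int × Int × List Int := (4, 2, [1, 2, 5, 3])

def Spec_solution (k : Int) (m : Int) (score : List Int) (out : Int) : Prop := out = solution_alt k m score
instance (k : Int) (m : Int) (score : List Int) (out : Int) : Decidable (Spec_solution k m score out) := by
  unfold Spec_solution; infer_instance

-- ===== CLAIM (what is proved, stated in full; the proofs are below) =====
def Claim_equal_solution : Prop := ∀ (k : Int) (m : Int) (score : List Int), Dom_solution k m score → Pre_solution k m score → Spec_solution k m score (solution k m score)

-- ===== LEMMAS AND PROOFS =====

-- sum of the elements of w at global indices pos+i with (pos+i+1) % M = 0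
def stridedFrom (M : Nat) : Nat → List Int → Int
  | _, [] => 0
  | pos, x :: xs => (if (pos + 1) % M = 0 then x else 0) + stridedFrom M (pos + 1) xs

lemma stridedFrom_eq_sum (M : Nat) (w : List Int) : ∀ pos,
    stridedFrom M pos w = ∑ i ∈ Finset.range w.length, (if (pos + i + 1) % M = 0 then w.getD i 0 else 0) := by
  induction w with
  | nil => intro pos; simp [stridedFrom]
  | cons x xs ih =>
    intro pos
    rw [List.length_cons, Finset.sum_range_succ']
    simp only [List.getD_cons_succ, List.getD_cons_zero, Nat.add_zero]
    rw [stridedFrom, ih (pos + 1), add_comm]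
    congr 1
    apply Finset.sum_congr rfl
    intro i _
    have h : pos + (i + 1) + 1 = pos + 1 + i + 1 := by omega
    rw [h]

lemma strided_split (M : Nat) (t u : List Int) : ∀ pos,
    stridedFrom M pos (t ++ u) = stridedFrom M pos t + stridedFrom M (pos + t.length) u := by
  induction t with
  | nil => intro pos; simp [stridedFrom]
  | cons x xs ih =>
    intro pos
    simp only [List.cons_append, stridedFrom, ih (pos + 1), List.length_cons]
    have h : pos + 1 + xs.length = pos + (xs.length + 1) := by omega
    rw [h, add_assoc]

-- a block shorter than M aligned at a multiple of M selects nothing; a full block selects its last element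
lemma strided_small_block (M pos : Nat) (hM : 0 < M) (hdvd : M ∣ pos) (w : List Int) (hlen : w.length ≤ M) :
    stridedFrom M pos w = if w.length = M then w.getD (M - 1) 0 else 0 := by
  have hpm : pos % M = 0 := Nat.mod_eq_zero_of_dvd hdvd
  have key : ∀ i : Nat, (pos + i + 1) % M = (i + 1) % M := by
    intro i
    have h : pos + i + 1 = pos + (i + 1) := by omega
    rw [h, Nat.add_mod, hpm, Nat.zero_add, Nat.mod_mod_of_dvd _ dvd_rfl]
  rw [stridedFrom_eq_sum]
  by_cases hl : w.length = M
  · rw [if_pos hl]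
    rw [Finset.sum_eq_single_of_mem (M - 1) (Finset.mem_range.2 (by omega))]
    · rw [if_pos]
      rw [key]
      have h : M - 1 + 1 = M := by omega
      rw [h, Nat.mod_self]
    · intro i hi hne
      rw [if_neg]
      rw [key, Nat.mod_eq_of_lt (by rw [Finset.mem_range, hl] at hi; omega)]
      omega
  · rw [if_neg hl]
    apply Finset.sum_eq_zero
    intro i hi
    rw [if_neg]
    rw [key, Nat.mod_eq_of_lt (by rw [Finset.mem_range] at hi; omega)]
    omega

-- the minimum of a full block of a descending-sorted list is the block's last element
lemma min_block_eq_last (s : List Int) (hp : List.Pairwise (fun a b => b ≤ a) s)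
    (j M : Nat) (hM : 0 < M) (h : j + M ≤ s.length) :
    (PySem.List.min? ((s.drop j).take M) (fun x => x)).getD 0 = s.getD (j + M - 1) 0 := by
  set u := (s.drop j).take M with hu
  have hlen : u.length = M := by
    simp [hu]
    omega
  have hd : List.Pairwise (fun a b : Int => b ≤ a) (s.drop j) := hp.drop
  have hup : List.Pairwise (fun a b : Int => b ≤ a) u :=
    hd.sublist (List.take_sublist _ _)
  have hMlt : M - 1 < u.length := by omega
  have hlast : u[M - 1]'hMlt = s.getD (j + M - 1) 0 := by
    have hjs : j + (M - 1) < s.length := by omega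
    have : u[M - 1]'hMlt = s[j + (M - 1)]'hjs := by
      simp [hu, List.getElem_take, List.getElem_drop]
    rw [this, List.getD_eq_getElem _ _ (by omega : j + M - 1 < s.length)]
    congr 1
    omega
  cases heq : PySem.List.min? u (fun x => x) with
  | none =>
      rw [PySem.List.min?_eq_none_iff] at heq
      simp [heq] at hlen
      omega
  | some m0 =>
      have hmem : m0 ∈ u := PySem.List.min?_mem heq
      have hmin := PySem.List.min?_isMin heq
      have h1 : m0 ≤ u[M - 1]'hMlt := hmin _ (List.getElem_mem hMlt)
      have h2 : u[M - 1]'hMlt ≤ m0 := by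
        obtain ⟨i, hi, he⟩ := List.mem_iff_getElem.mp hmem
        rcases Nat.lt_or_ge i (M - 1) with hilt | hige
        · have := (List.pairwise_iff_getElem.mp hup) i (M - 1) hi hMlt hilt
          rw [he] at this
          exact this
        · have : i = M - 1 := by omega
          subst this
          rw [he]
      rw [Option.getD_some, hlast.symm]
      omega

-- A's loop from start = j (a multiple of M) adds M times the strided sum of the suffix
lemma solLoop_eq_strided (s : List Int) (hp : List.Pairwise (fun a b => b ≤ a) s)
    (M : Nat) (hM : 0 < M) :
    ∀ (fuel j : Nat) (acc : Int), M ∣ j → j ≤ s.length → s.length + 1 ≤ fuel + j →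
      solLoop (M : Int) s fuel (j : Int) acc = acc + (M : Int) * stridedFrom M j (s.drop j) := by
  intro fuel
  induction fuel with
  | zero => intro j acc _ hj hf; omega
  | succ fuel ih =>
      intro j acc hdvd hj hf
      by_cases h : (j : Int) + (M : Int) ≤ PySem.List.len s
      · have hjM : j + M ≤ s.length := by
          simp only [PySem.List.len] at h
          exact_mod_cast h
        have hcalc : pyCalc (j : Int) (M : Int) s = s.getD (j + M - 1) 0 * (M : Int) := by
          unfold pyCalc
          rw [PySem.List.slice_natCast_add, min_block_eq_last s hp j M hM hjM]
        rw [solLoop, if_pos h]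
        have hih := ih (j + M) (acc + pyCalc (j : Int) (M : Int) s)
          (Nat.dvd_add hdvd dvd_rfl) (by omega) (by omega)
        rw [show ((j + M : Nat) : Int) = (j : Int) + (M : Int) by push_cast; ring] at hih
        rw [hih, hcalc]
        have hsplit : s.drop j = (s.drop j).take M ++ (s.drop j).drop M :=
          (List.take_append_drop _ _).symm
        have hlentake : ((s.drop j).take M).length = M := by
          simp
          omega
        have hdd : (s.drop j).drop M = s.drop (j + M) := by
          rw [List.drop_drop]
        conv_rhs => rw [hsplit]
        rw [strided_split, hlentake, hdd,
          strided_small_block M j hM hdvd _ (le_of_eq hlentake), if_pos hlentake]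
        have hget : ((s.drop j).take M).getD (M - 1) 0 = s.getD (j + M - 1) 0 := by
          rw [List.getD_eq_getElem _ _ (by omega : M - 1 < ((s.drop j).take M).length),
            List.getD_eq_getElem _ _ (by omega : j + M - 1 < s.length)]
          simp only [List.getElem_take, List.getElem_drop]
          congr 1
          omega
        rw [hget]
        ring
      · rw [solLoop, if_neg h]
        have hlt : s.length < j + M := by
          simp only [PySem.List.len] at h
          omega
        have hsmall : stridedFrom M j (s.drop j) = 0 := by
          rw [strided_small_block M j hM hdvd _ (by simp; omega)]
          rw [if_neg (by simp; omega)]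
        rw [hsmall]
        ring

-- one value group: c copies of v starting at pos contribute v * (#block boundaries inside (pos, pos+c])
lemma strided_replicate_append (M : Nat) (hM : 0 < M) (v : Int) (rest : List Int) : ∀ (c pos : Nat),
    stridedFrom M pos (List.replicate c v ++ rest)
      = v * (((pos + c) / M - pos / M : Nat) : Int) + stridedFrom M (pos + c) rest := by
  intro c
  induction c with
  | zero => intro pos; simp [List.replicate]
  | succ c ih =>
    intro pos
    have hrep : List.replicate (c + 1) v ++ rest = v :: (List.replicate c v ++ rest) := by
      simp [List.replicate_succ]
    rw [hrep, stridedFrom, ih (pos + 1)]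
    have hb : (pos + 1) / M = pos / M + if M ∣ pos + 1 then 1 else 0 := Nat.succ_div
    have h2 : (pos + 1) / M ≤ (pos + (c + 1)) / M := Nat.div_le_div_right (by omega)
    rw [show pos + 1 + c = pos + (c + 1) from by omega]
    by_cases hd : M ∣ pos + 1
    · rw [if_pos hd] at hb
      have hmod : (pos + 1) % M = 0 := Nat.mod_eq_zero_of_dvd hd
      rw [if_pos hmod, hb]
      have hle : pos / M + 1 ≤ (pos + (c + 1)) / M := by omega
      have hsub : (pos + (c + 1)) / M - pos / M = ((pos + (c + 1)) / M - (pos / M + 1)) + 1 := by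
        omega
      rw [hsub]
      push_cast
      ring
    · rw [if_neg hd] at hb
      have hmod : ¬ (pos + 1) % M = 0 := fun h => hd (Nat.dvd_of_mod_eq_zero h)
      rw [if_neg hmod, hb]
      simp

-- a descending-sorted list is the concatenation of its distinct values' runs
lemma desc_group (s : List Int) (hs : s.Pairwise (fun a b => b ≤ a)) :
    ∀ (vs : List Int), vs.Pairwise (fun a b => b < a) → (∀ v, v ∈ vs ↔ v ∈ s) →
      vs.flatMap (fun v => List.replicate (s.count v) v) = s := by
  intro vs hvs hmem
  have hnd : vs.Nodup := hvs.imp (fun {a b} h => ne_of_gt h)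
  have hcount : ∀ (us : List Int), us.Nodup → ∀ w,
      (us.flatMap (fun v => List.replicate (s.count v) v)).count w
        = if w ∈ us then s.count w else 0 := by
    intro us
    induction us with
    | nil => intro _ w; simp
    | cons v rest ih =>
      intro hnd2 w
      rw [List.flatMap_cons, List.count_append, List.count_replicate,
        ih (List.nodup_cons.1 hnd2).2 w]
      by_cases hw : w = v
      · subst hw
        have hnr : w ∉ rest := (List.nodup_cons.1 hnd2).1
        simp [hnr]
      · simp [hw, Ne.symm hw, List.mem_cons]
  have hperm : (vs.flatMap (fun v => List.replicate (s.count v) v)).Perm s := by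
    rw [List.perm_iff_count]
    intro w
    rw [hcount vs hnd w]
    by_cases hw : w ∈ vs
    · rw [if_pos hw]
    · rw [if_neg hw]
      symm
      rw [List.count_eq_zero]
      exact fun hws => hw ((hmem w).2 hws)
  have hsorted : ∀ (us : List Int), us.Pairwise (fun a b => b < a) →
      (us.flatMap (fun v => List.replicate (s.count v) v)).Pairwise (fun a b : Int => b ≤ a) := by
    intro us
    induction us with
    | nil => intro _; simp
    | cons v rest ih =>
      intro hp
      rw [List.flatMap_cons, List.pairwise_append]
      refine ⟨List.pairwise_replicate.2 (Or.inr le_rfl), ih (List.pairwise_cons.1 hp).2, ?_⟩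
      intro x hx y hy
      have hxv : x = v := List.eq_of_mem_replicate hx
      obtain ⟨u, hu, hyu⟩ := List.mem_flatMap.1 hy
      have hyu' : y = u := List.eq_of_mem_replicate hyu
      have huv : u < v := (List.pairwise_cons.1 hp).1 u hu
      rw [hxv, hyu']
      exact le_of_lt huv
  exact hperm.eq_of_pairwise (fun a b _ _ h1 h2 => le_antisymm h2 h1) (hsorted vs hvs) hs

-- B's fold over the distinct values computes the strided sum of the grouped list
lemma foldB_eq_strided (M : Nat) (hM : 0 < M) (cnt : Int → Nat) :
    ∀ (vs : List Int) (tot : Int) (pos : Nat),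
      (vs.foldl (fun (st : Int × Int) v =>
          (st.1 + v * (PySem.Int.floordiv (st.2 + (cnt v : Int)) (M : Int) - PySem.Int.floordiv st.2 (M : Int)),
           st.2 + (cnt v : Int))) (tot, (pos : Int))).1
        = tot + stridedFrom M pos (vs.flatMap (fun v => List.replicate (cnt v) v)) := by
  intro vs
  induction vs with
  | nil => intro tot pos; simp [stridedFrom]
  | cons v rest ih =>
    intro tot pos
    rw [List.foldl_cons]
    have hc : (pos : Int) + (cnt v : Int) = ((pos + cnt v : Nat) : Int) := by push_cast; ring
    have hrep : stridedFrom M pos (List.replicate (cnt v) v)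
        = v * (((pos + cnt v) / M - pos / M : Nat) : Int) := by
      have h := strided_replicate_append M hM v [] (cnt v) pos
      simpa [stridedFrom] using h
    have hle : pos / M ≤ (pos + cnt v) / M := Nat.div_le_div_right (by omega)
    rw [hc, PySem.Int.floordiv_natCast, PySem.Int.floordiv_natCast, ih _ (pos + cnt v),
      List.flatMap_cons, strided_split, List.length_replicate, hrep, Nat.cast_sub hle]
    push_cast
    ring

-- ===== VERDICT (by name: the statement is the Claim_ definition above) =====
theorem solution_spec : Claim_equal_solution := by
  intro k m score _ hpre
  unfold Spec_solution solution solution_alt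
  dsimp only
  set s := PySem.List.sorted score (fun x => x) true with hsdef
  have hp : List.Pairwise (fun a b : Int => b ≤ a) s :=
    PySem.List.sorted_pairwise_rev score (fun x => x)
  have hm1 : (1 : Int) ≤ m := hpre
  have hmM : m = ((m.toNat : Nat) : Int) := (Int.toNat_of_nonneg (by omega)).symm
  have hM : 0 < m.toNat := by omega
  have hA := solLoop_eq_strided s hp m.toNat hM (s.length + 1) 0 0 (dvd_zero _) (by omega) (by omega)
  simp only [Nat.cast_zero, List.drop_zero, zero_add] at hA
  set counts := score.foldl (fun (d : PySem.Dict Int Int) v => d.insert v (d.getD v 0 + 1))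
    PySem.Dict.empty with hcdef
  have hgetD : ∀ v : Int, counts.getD v 0 = ((score.count v : Nat) : Int) := by
    intro v
    rw [hcdef, PySem.Dict.getD_foldl_insert_add_one, PySem.Dict.getD_empty]
    simp
  have hkeys : counts.keys = PySem.Set.ofList score := by
    rw [hcdef, PySem.Dict.keys_foldl_insert, PySem.Dict.keys_empty, PySem.Set.ofList_eq_foldl]
    rfl
  simp only [hkeys, hgetD]
  set vs := PySem.List.sorted (PySem.Set.ofList score) (fun x => x) true with hvsdef
  have hvs_le : List.Pairwise (fun a b : Int => b ≤ a) vs :=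
    PySem.List.sorted_pairwise_rev _ (fun x => x)
  have hvs_nodup : vs.Nodup :=
    ((PySem.List.sorted_perm (PySem.Set.ofList score) (fun x => x) true).nodup_iff).2
      (PySem.Set.nodup_ofList score)
  have hvs : List.Pairwise (fun a b : Int => b < a) vs :=
    (hvs_le.and hvs_nodup).imp (fun {a b} h => lt_of_le_of_ne h.1 h.2.symm)
  have hmemv : ∀ v, v ∈ vs ↔ v ∈ s := by
    intro v
    rw [hvsdef, hsdef, PySem.List.mem_sorted, PySem.List.mem_sorted, PySem.Set.mem_ofList]
  have hcnt : ∀ v : Int, score.count v = s.count v := fun v =>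
    ((PySem.List.sorted_perm score (fun x => x) true).count_eq v).symm
  have hB := foldB_eq_strided m.toNat hM (fun v => score.count v) vs 0 0
  simp only [Nat.cast_zero, zero_add] at hB
  rw [hmM, hB]
  simp only [hcnt]
  rw [desc_group s hp vs hvs hmemv, hA]
  ring
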